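-- pv_equiv track=rewrite | github.com/kensekense/Masters-Thesis | src/ltl.py | universality
-- ===== SOURCE A (Python) =====
-- def universality (trace, scope, condition):
--
--     assert type(trace) == list
--     assert type(scope) == list
--     assert type(condition) == list
--
--     sol = []
--
--     for subsequence in scope:
--         flag = True
--         for item in trace[subsequence[0]:subsequence[1]+1]:
--             if item not in condition:
--                 sol.append(False)
--                 flag = False
--                 break
--         if flag:
--             sol.append(True)
--
--     return sol
-- ===== SOURCE B (Python) =====
-- def universality(trace, scope, condition):
--     # Precompute a membership set and a prefix count of "bad" positions,
--     # answering each scope interval in O(1) instead of rescanning it.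
--     n = len(trace)
--     cond = set(condition)
--     pref = [0]
--     c = 0
--     for x in trace:
--         if x not in cond:
--             c += 1
--         pref.append(c)
--
--     def norm(i):
--         if i < 0:
--             i += n
--         return max(0, min(n, i))
--
--     sol = []
--     for start, end in scope:
--         lo = norm(start)
--         hi = norm(end + 1)
--         sol.append(lo >= hi or pref[hi] == pref[lo])
--     return sol
-- ===== Notes on version B (the rewrite author's own statement) =====
-- stated objective: faster
-- what changed: Replaces A's per-interval rescan (each item tested against the whole condition list) with a precomputed membership set and a prefix count of out-of-condition positions, answering each scope interval in O(1).
import Mathlib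
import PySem

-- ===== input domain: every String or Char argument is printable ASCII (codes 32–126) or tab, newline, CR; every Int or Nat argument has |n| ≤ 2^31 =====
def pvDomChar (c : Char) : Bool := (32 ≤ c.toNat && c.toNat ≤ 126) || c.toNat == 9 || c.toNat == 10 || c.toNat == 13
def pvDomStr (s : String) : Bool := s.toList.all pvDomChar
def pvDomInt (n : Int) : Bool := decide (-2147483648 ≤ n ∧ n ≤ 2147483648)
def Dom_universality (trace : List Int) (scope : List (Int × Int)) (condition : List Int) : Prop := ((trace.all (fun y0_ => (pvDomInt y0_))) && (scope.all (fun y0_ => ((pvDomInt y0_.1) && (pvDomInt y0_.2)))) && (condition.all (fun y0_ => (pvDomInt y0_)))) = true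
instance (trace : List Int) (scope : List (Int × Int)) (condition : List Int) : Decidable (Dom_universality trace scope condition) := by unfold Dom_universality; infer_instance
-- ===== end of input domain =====

-- B replaces A's per-interval rescans (each testing every item against the whole condition list)
-- by one precomputed membership set plus a prefix count of out-of-condition positions, making each
-- scope query O(1); objective: faster.

-- ===== PORT A =====
-- inner 'for item in trace[...]' loop with its break/flag; returns (sol after the loop, flag)
def pvAInner (items : List Int) (condition : List Int) (sol : List Bool) : List Bool × Bool :=
  match items with
  | [] => (sol, true)
  | x :: rest =>
      if !(condition.contains x) then (sol ++ [false], false)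
      else pvAInner rest condition sol

def universality (trace : List Int) (scope : List (Int × Int)) (condition : List Int) : List Bool :=
  scope.foldl (fun sol subsequence =>
    let r := pvAInner (PySem.List.slice trace (some subsequence.1) (some (subsequence.2 + 1))) condition sol
    if r.2 then r.1 ++ [true] else r.1) []

-- ===== PORT B =====
-- Python's norm(i): if i < 0: i += n; return max(0, min(n, i))
def pvBNorm (n : Nat) (i : Int) : Nat :=
  (max 0 (min (n : Int) (if i < 0 then i + n else i))).toNat

-- the prefix-count loop: pref = [0]; c = 0; for x in trace: c += x not in cond; pref.append(c)
def pvBPref (cond : PySem.Set Int) (trace : List Int) : List Int :=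
  (trace.foldl (fun (pc : List Int × Int) x =>
      let c := if !(PySem.Set.contains cond x) then pc.2 + 1 else pc.2
      (pc.1 ++ [c], c)) ([0], 0)).1

def universality_alt (trace : List Int) (scope : List (Int × Int)) (condition : List Int) : List Bool :=
  let n := trace.length
  let cond := PySem.Set.ofList condition
  let pref := pvBPref cond trace
  scope.map (fun s =>
    let lo := pvBNorm n s.1
    let hi := pvBNorm n (s.2 + 1)
    decide (hi ≤ lo) || decide (pref.getD hi 0 = pref.getD lo 0))

-- ===== PRECONDITION & SPEC =====
def Spec_universality (trace : List Int) (scope : List (Int × Int)) (condition : List Int) (out : List Bool) : Prop := out = universality_alt trace scope condition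
instance (trace : List Int) (scope : List (Int × Int)) (condition : List Int) (out : List Bool) : Decidable (Spec_universality trace scope condition out) := by unfold Spec_universality; infer_instance

-- ===== CLAIM (what is proved, stated in full; the proofs are below) =====
def Claim_equal_universality : Prop := ∀ (trace : List Int) (scope : List (Int × Int)) (condition : List Int), Dom_universality trace scope condition → Spec_universality trace scope condition (universality trace scope condition)

-- ===== LEMMAS AND PROOFS =====

-- helper for the proofs only: the running prefix counts as a scan
def pvScan (cond : PySem.Set Int) : List Int → Int → List Int
  | [], _ => []
  | x :: rest, c =>
      let c' := if !(PySem.Set.contains cond x) then c + 1 else c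
      c' :: pvScan cond rest c'

theorem pvBPref_foldl (cond : PySem.Set Int) (l : List Int) :
    ∀ (p : List Int) (c : Int),
      (l.foldl (fun (pc : List Int × Int) x =>
        let c := if !(PySem.Set.contains cond x) then pc.2 + 1 else pc.2
        (pc.1 ++ [c], c)) (p, c)).1 = p ++ pvScan cond l c := by
  induction l with
  | nil => intro p c; simp [pvScan]
  | cons x rest ih =>
      intro p c
      simp only [List.foldl_cons, pvScan]
      rw [ih]
      simp

theorem pvScan_getD (cond : PySem.Set Int) (l : List Int) :
    ∀ (c : Int) (i : Nat), i ≤ l.length →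
      (c :: pvScan cond l c).getD i 0
        = c + ((l.take i).countP (fun x => !(PySem.Set.contains cond x)) : Int) := by
  induction l with
  | nil =>
      intro c i hi
      have : i = 0 := by simpa using hi
      simp [this]
  | cons x rest ih =>
      intro c i hi
      match i with
      | 0 => simp
      | Nat.succ j =>
          have hj : j ≤ rest.length := by simpa using hi
          simp only [pvScan, List.getD, List.getElem?_cons_succ]
          have := ih (if !(PySem.Set.contains cond x) then c + 1 else c) j hj
          simp only [List.getD] at this
          rw [this]
          simp only [List.take_succ_cons, List.countP_cons]
          push_cast
          split_ifs <;> (simp_all; try ring)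

theorem pvBPref_getD (cond : PySem.Set Int) (trace : List Int) (i : Nat) (hi : i ≤ trace.length) :
    (pvBPref cond trace).getD i 0
      = ((trace.take i).countP (fun x => !(PySem.Set.contains cond x)) : Int) := by
  unfold pvBPref
  rw [pvBPref_foldl cond trace [0] 0]
  have := pvScan_getD cond trace 0 i hi
  simpa using this

theorem pvBNorm_eq_clampIdx (n : Nat) (i : Int) : pvBNorm n i = PySem.List.clampIdx n i := by
  unfold pvBNorm PySem.List.clampIdx
  split_ifs <;> omega

theorem pvBNorm_le (n : Nat) (i : Int) : pvBNorm n i ≤ n := by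
  unfold pvBNorm; omega

-- A\'s inner loop appends exactly one Bool: whether all items are in condition
theorem pvAInner_spec (condition : List Int) (items : List Int) :
    ∀ sol : List Bool,
      (let r := pvAInner items condition sol; if r.2 then r.1 ++ [true] else r.1)
        = sol ++ [items.all (fun x => condition.contains x)] := by
  induction items with
  | nil => intro sol; simp [pvAInner]
  | cons x rest ih =>
      intro sol
      by_cases h : x ∈ condition
      · have hstep : pvAInner (x :: rest) condition sol = pvAInner rest condition sol := by
          simp [pvAInner, h]
        simp only [hstep]
        rw [ih sol]
        simp [h]
      · simp [pvAInner, h]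

theorem pvFoldl_body {α β : Type} (f : List β → α → List β) (g : α → β)
    (hf : ∀ sol s, f sol s = sol ++ [g s]) :
    ∀ (l : List α) (init : List β), l.foldl f init = init ++ l.map g := by
  intro l
  induction l with
  | nil => intro init; simp
  | cons x rest ih => intro init; simp [hf, ih]

theorem pvAll_eq_countP (cond : List Int) (l : List Int) :
    l.all (fun x => cond.contains x)
      = decide (l.countP (fun x => !(cond.contains x)) = 0) := by
  rw [Bool.eq_iff_iff]
  simp [List.all_eq_true, List.countP_eq_zero]

theorem pvContains_ofList (condition : List Int) (x : Int) :
    PySem.Set.contains (PySem.Set.ofList condition) x = condition.contains x := by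
  rw [PySem.Set.contains_eq_listContains]
  by_cases h : x ∈ condition
  · simp [h, PySem.Set.mem_ofList]
  · simp [h, PySem.Set.mem_ofList]

theorem pvQuery_eq (trace : List Int) (condition : List Int) (a b : Int) :
    (PySem.List.slice trace (some a) (some (b + 1))).all (fun x => condition.contains x)
      = (decide (pvBNorm trace.length (b + 1) ≤ pvBNorm trace.length a)
         || decide ((pvBPref (PySem.Set.ofList condition) trace).getD (pvBNorm trace.length (b + 1)) 0
                    = (pvBPref (PySem.Set.ofList condition) trace).getD (pvBNorm trace.length a) 0)) := by
  have hlo := pvBNorm_le trace.length a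
  have hhi := pvBNorm_le trace.length (b + 1)
  have hslice : PySem.List.slice trace (some a) (some (b + 1))
      = (trace.drop (pvBNorm trace.length a)).take (pvBNorm trace.length (b + 1) - pvBNorm trace.length a) := by
    simp [PySem.List.slice, pvBNorm_eq_clampIdx]
  rw [hslice, pvBPref_getD _ _ _ hhi, pvBPref_getD _ _ _ hlo]
  simp only [pvContains_ofList]
  set lo := pvBNorm trace.length a
  set hi := pvBNorm trace.length (b + 1)
  by_cases hc : hi ≤ lo
  · have h0 : hi - lo = 0 := by omega
    simp [h0, hc]
  · have hsplit : (trace.take hi).countP (fun x => !(condition.contains x))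
        = (trace.take lo).countP (fun x => !(condition.contains x))
          + ((trace.drop lo).take (hi - lo)).countP (fun x => !(condition.contains x)) := by
      have hadd : lo + (hi - lo) = hi := by omega
      rw [← hadd, List.take_add, List.countP_append]
      have h2 : lo + (hi - lo) - lo = hi - lo := by omega
      rw [h2]
    have hzero := List.countP_eq_zero
      (p := fun x => !(condition.contains x)) (l := (trace.drop lo).take (hi - lo))
    have hiff : (∀ x ∈ (trace.drop lo).take (hi - lo), x ∈ condition)
        ↔ ((trace.take hi).countP (fun x => !(condition.contains x))
           = (trace.take lo).countP (fun x => !(condition.contains x))) := by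
      rw [hsplit]
      constructor
      · intro h
        have h0 : ((trace.drop lo).take (hi - lo)).countP (fun x => !(condition.contains x)) = 0 := by
          apply hzero.mpr
          intro a ha
          simp [h a ha]
        omega
      · intro h
        have h0 : ((trace.drop lo).take (hi - lo)).countP (fun x => !(condition.contains x)) = 0 := by
          omega
        intro a ha
        have := hzero.mp h0 a ha
        simpa using this
    rw [pvAll_eq_countP]
    simp [hc, hiff]

-- ===== VERDICT (by name: the statement is the Claim_ definition above) =====
theorem universality_spec : Claim_equal_universality := by
  intro trace scope condition _
  unfold Spec_universality universality universality_alt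
  rw [pvFoldl_body _
      (fun s => (PySem.List.slice trace (some s.1) (some (s.2 + 1))).all (fun x => condition.contains x))
      (fun sol s => pvAInner_spec condition _ sol) scope []]
  simp only [List.nil_append]
  apply List.map_congr_left
  intro s _
  exact pvQuery_eq trace condition s.1 s.2
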